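-- pv_equiv track=rewrite | github.com/debora-oliv/Grafos-Transporte-Eficiente | Bellmanford/main.py | remover_bloqueios
-- ===== SOURCE A (Python) =====
-- from copy import deepcopy
--
-- def remover_bloqueios(graph, bloqueios_afetados):
--     new_graph = deepcopy(graph)
--     for node1, node2 in bloqueios_afetados:
--         if node1 in new_graph and node2 in new_graph[node1]:
--             del new_graph[node1][node2]
--         if node2 in new_graph and node1 in new_graph[node2]:
--             del new_graph[node2][node1]
--     return new_graph
-- ===== SOURCE B (Python) =====
-- from copy import deepcopy
--
-- def remover_bloqueios(graph, bloqueios_afetados):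
--     blocked = set(bloqueios_afetados)
--     new_graph = deepcopy(graph)
--     return {n: {k: v for k, v in adj.items()
--                 if (n, k) not in blocked and (k, n) not in blocked}
--             for n, adj in new_graph.items()}
-- ===== Notes on version B (the rewrite author's own statement) =====
-- stated objective: idiomatic
-- what changed: Replaces the delete-in-place loop over blocked pairs (lookup node, del both directions) by building a blocked set once and returning a dict comprehension that filters every edge by membership of (n,k) or (k,n) in that set; Pre_ only excludes Lean-side association lists with duplicate outer or inner keys, which do not represent Python dicts.
import Mathlib
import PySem

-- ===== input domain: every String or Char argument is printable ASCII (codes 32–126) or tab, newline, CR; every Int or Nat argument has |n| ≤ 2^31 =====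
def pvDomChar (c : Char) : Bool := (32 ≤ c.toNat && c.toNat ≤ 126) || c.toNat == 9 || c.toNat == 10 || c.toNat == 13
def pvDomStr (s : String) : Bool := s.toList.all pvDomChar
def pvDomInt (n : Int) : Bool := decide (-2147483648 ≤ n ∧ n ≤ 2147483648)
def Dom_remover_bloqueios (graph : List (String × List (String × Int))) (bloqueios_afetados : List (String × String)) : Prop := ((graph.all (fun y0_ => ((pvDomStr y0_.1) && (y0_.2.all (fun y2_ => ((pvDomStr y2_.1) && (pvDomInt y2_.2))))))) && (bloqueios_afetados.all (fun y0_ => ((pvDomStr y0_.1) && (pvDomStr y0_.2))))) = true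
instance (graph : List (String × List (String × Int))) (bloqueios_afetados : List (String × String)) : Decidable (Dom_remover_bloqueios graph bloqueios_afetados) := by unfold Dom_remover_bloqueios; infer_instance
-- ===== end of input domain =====

-- B replaces A's delete-in-place loop over blocked pairs by one blocked set plus a
-- membership-filtering dict comprehension (idiomatic; same cost). Return value only:
-- both build a fresh dict, neither mutates its arguments.


-- ===== PORT A =====
-- 'if node1 in new_graph and node2 in new_graph[node1]: del new_graph[node1][node2]':
-- find the first entry keyed node1, and if its adjacency contains node2, erase that
-- first matching inner pair; otherwise leave the graph unchanged.
def pvDelEdge : List (String × List (String × Int)) → String → String → List (String × List (String × Int))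
  | [], _, _ => []
  | (k, adj) :: rest, a, b =>
    if k == a then
      if adj.any (fun kv => kv.1 == b) then
        (k, adj.eraseP (fun kv => kv.1 == b)) :: rest
      else (k, adj) :: rest
    else (k, adj) :: pvDelEdge rest a b

def remover_bloqueios (graph : List (String × List (String × Int))) (bloqueios_afetados : List (String × String)) : List (String × List (String × Int)) :=
  bloqueios_afetados.foldl
    (fun g p => pvDelEdge (pvDelEdge g p.1 p.2) p.2 p.1)
    graph

-- ===== PORT B =====
def remover_bloqueios_alt (graph : List (String × List (String × Int))) (bloqueios_afetados : List (String × String)) : List (String × List (String × Int)) :=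
  let blocked := PySem.Set.ofList bloqueios_afetados
  graph.map (fun e =>
    (e.1, e.2.filter (fun kv => !(blocked.contains (e.1, kv.1)) && !(blocked.contains (kv.1, e.1)))))

-- ===== PRECONDITION & SPEC =====
-- Pre_ excludes association lists with duplicate outer or inner keys: those do not
-- represent Python dicts (A's delete-first-occurrence behaviour there is an artefact of
-- the list encoding), so every actual Python input is admitted.
def Pre_remover_bloqueios (graph : List (String × List (String × Int))) (bloqueios_afetados : List (String × String)) : Prop :=
  (graph.map (·.1)).Nodup ∧ ∀ e ∈ graph, (e.2.map (·.1)).Nodup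
instance (graph : List (String × List (String × Int))) (bloqueios_afetados : List (String × String)) : Decidable (Pre_remover_bloqueios graph bloqueios_afetados) := by unfold Pre_remover_bloqueios; infer_instance
def pvWitness_remover_bloqueios : (List (String × List (String × Int))) × (List (String × String)) :=
  ([("a", [("b", 2), ("c", 5)]), ("b", [("a", 2)]), ("c", [("a", 5)])], [("a", "b"), ("x", "c")])

def Spec_remover_bloqueios (graph : List (String × List (String × Int))) (bloqueios_afetados : List (String × String)) (out : List (String × List (String × Int))) : Prop := out = remover_bloqueios_alt graph bloqueios_afetados
instance (graph : List (String × List (String × Int))) (bloqueios_afetados : List (String × String)) (out : List (String × List (String × Int))) : Decidable (Spec_remover_bloqueios graph bloqueios_afetados out) := by unfold Spec_remover_bloqueios; infer_instance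

-- ===== CLAIM (what is proved, stated in full; the proofs are below) =====
def Claim_equal_remover_bloqueios : Prop := ∀ (graph : List (String × List (String × Int))) (bloqueios_afetados : List (String × String)), Dom_remover_bloqueios graph bloqueios_afetados → Pre_remover_bloqueios graph bloqueios_afetados → Spec_remover_bloqueios graph bloqueios_afetados (remover_bloqueios graph bloqueios_afetados)

-- ===== LEMMAS AND PROOFS =====

-- guarded erase of the first inner pair keyed b = filter, when inner keys are unique
theorem pvEraseP_eq_filter (l : List (String × Int)) (b : String) (h : (l.map (·.1)).Nodup) :
    (if l.any (fun kv => kv.1 == b) then l.eraseP (fun kv => kv.1 == b) else l)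
      = l.filter (fun kv => !(kv.1 == b)) := by
  induction l with
  | nil => simp
  | cons kv t ih =>
    simp only [List.map_cons, List.nodup_cons] at h
    by_cases hb : kv.1 = b
    · have hbeq : (kv.1 == b) = true := by simpa using hb
      have ht : t.filter (fun kv2 => !(kv2.1 == b)) = t := by
        apply List.filter_eq_self.2
        intro x hx
        have hxb : x.1 ≠ b := by
          intro hxb
          exact h.1 (by rw [hb, ← hxb]; exact List.mem_map_of_mem hx)
        simpa using hxb
      simp [List.any_cons, hbeq, ht]
    · have hbeq : (kv.1 == b) = false := by simpa using hb
      simp only [List.any_cons, hbeq, Bool.false_or, List.eraseP_cons, List.filter_cons,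
        Bool.not_false, if_true]
      rw [← ih h.2]
      by_cases ht : t.any (fun kv2 => kv2.1 == b) = true <;> simp [ht]

theorem pvDelEdge_eq_map (g : List (String × List (String × Int))) (a b : String)
    (hk : (g.map (·.1)).Nodup) (hin : ∀ e ∈ g, (e.2.map (·.1)).Nodup) :
    pvDelEdge g a b
      = g.map (fun e => (e.1, if e.1 = a then e.2.filter (fun kv => !(kv.1 == b)) else e.2)) := by
  induction g with
  | nil => rfl
  | cons e rest ih =>
    obtain ⟨k, adj⟩ := e
    simp only [List.map_cons, List.nodup_cons] at hk
    by_cases hka : k = a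
    · subst hka
      have hrest : rest.map (fun e => (e.1, if e.1 = k then e.2.filter (fun kv => !(kv.1 == b)) else e.2)) = rest := by
        rw [List.map_congr_left (g := id) ?_, List.map_id]
        intro e he
        have hek : e.1 ≠ k := fun hek => hk.1 (hek ▸ List.mem_map_of_mem he)
        simp [hek]
      have hinner := pvEraseP_eq_filter adj b (hin (k, adj) (by simp))
      by_cases hany : adj.any (fun kv => kv.1 == b) = true
      · simp only [pvDelEdge, beq_self_eq_true, if_true, hany, List.map_cons, hrest]
        simp only [hany, if_true] at hinner
        simp [hinner]
      · simp only [pvDelEdge, beq_self_eq_true, if_true, hany, List.map_cons, hrest]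
        simp only [hany] at hinner
        simp only [Bool.false_eq_true, if_false] at hinner ⊢
        simp [← hinner]
    · have hbeq : (k == a) = false := by simpa using hka
      simp only [pvDelEdge, hbeq, Bool.false_eq_true, if_false, List.map_cons, hka]
      rw [ih hk.2 (fun e he => hin e (List.mem_cons_of_mem _ he))]

-- the two map-forms compose: one fold step removes exactly the pairs equal to p (either way round)
theorem pvStep_eq_map (g : List (String × List (String × Int))) (p : String × String)
    (hk : (g.map (·.1)).Nodup) (hin : ∀ e ∈ g, (e.2.map (·.1)).Nodup) :
    pvDelEdge (pvDelEdge g p.1 p.2) p.2 p.1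
      = g.map (fun e =>
          (e.1, e.2.filter (fun kv => !((e.1, kv.1) == p) && !((kv.1, e.1) == p)))) := by
  obtain ⟨a, b⟩ := p
  rw [pvDelEdge_eq_map g a b hk hin]
  rw [pvDelEdge_eq_map _ b a]
  · rw [List.map_map]
    apply List.map_congr_left
    intro e _
    simp only [Function.comp]
    congr 1
    split_ifs with h2 h1 h1
    · rw [List.filter_filter]
      apply List.filter_congr
      intro kv _
      rw [Bool.eq_iff_iff]
      simp only [Bool.and_eq_true, Bool.not_eq_true', beq_eq_false_iff_ne, ne_eq,
        Prod.mk.injEq, not_and]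
      tauto
    · apply List.filter_congr
      intro kv _
      rw [Bool.eq_iff_iff]
      simp only [Bool.and_eq_true, Bool.not_eq_true', beq_eq_false_iff_ne, ne_eq,
        Prod.mk.injEq, not_and]
      tauto
    · apply List.filter_congr
      intro kv _
      rw [Bool.eq_iff_iff]
      simp only [Bool.and_eq_true, Bool.not_eq_true', beq_eq_false_iff_ne, ne_eq,
        Prod.mk.injEq, not_and]
      tauto
    · rw [eq_comm, List.filter_eq_self]
      intro kv _
      simp only [Bool.and_eq_true, Bool.not_eq_true', beq_eq_false_iff_ne, ne_eq,
        Prod.mk.injEq, not_and]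
      tauto
  · simpa [List.map_map, Function.comp] using hk
  · intro e he
    simp only [List.mem_map] at he
    obtain ⟨e0, he0, rfl⟩ := he
    by_cases h : e0.1 = a
    · simp only [h, if_true]
      exact (hin e0 he0).sublist (List.filter_sublist.map _)
    · simpa [h] using hin e0 he0

-- Pre_ is preserved by one fold step
theorem pvStep_pre (g : List (String × List (String × Int))) (p : String × String)
    (hk : (g.map (·.1)).Nodup) (hin : ∀ e ∈ g, (e.2.map (·.1)).Nodup) :
    ((pvDelEdge (pvDelEdge g p.1 p.2) p.2 p.1).map (·.1)).Nodup ∧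
      ∀ e ∈ pvDelEdge (pvDelEdge g p.1 p.2) p.2 p.1, (e.2.map (·.1)).Nodup := by
  rw [pvStep_eq_map g p hk hin]
  constructor
  · simpa [List.map_map, Function.comp] using hk
  · intro e he
    simp only [List.mem_map] at he
    obtain ⟨e0, he0, rfl⟩ := he
    exact (hin e0 he0).sublist (List.filter_sublist.map _)

theorem pvFold_eq_map (bs : List (String × String)) :
    ∀ g : List (String × List (String × Int)),
    (g.map (·.1)).Nodup → (∀ e ∈ g, (e.2.map (·.1)).Nodup) →
    bs.foldl (fun g p => pvDelEdge (pvDelEdge g p.1 p.2) p.2 p.1) g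
      = g.map (fun e =>
          (e.1, e.2.filter (fun kv => !(bs.contains (e.1, kv.1)) && !(bs.contains (kv.1, e.1))))) := by
  induction bs with
  | nil =>
    intro g _ _
    simp
  | cons p t ih =>
    intro g hk hin
    simp only [List.foldl_cons]
    obtain ⟨hk2, hin2⟩ := pvStep_pre g p hk hin
    rw [ih _ hk2 hin2, pvStep_eq_map g p hk hin, List.map_map]
    apply List.map_congr_left
    intro e _
    simp only [Function.comp, List.filter_filter]
    congr 1
    apply List.filter_congr
    intro kv _
    simp only [List.contains_cons]
    cases h1 : ((e.1, kv.1) == p) <;> cases h2 : ((kv.1, e.1) == p) <;>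
      cases h3 : t.contains (e.1, kv.1) <;> cases h4 : t.contains (kv.1, e.1) <;> rfl

theorem pvSetContains (bs : List (String × String)) (x : String × String) :
    (PySem.Set.ofList bs).contains x = bs.contains x := by
  simp only [PySem.Set.contains_eq_listContains]
  cases h : bs.contains x
  · have : x ∉ bs := by simpa using h
    simpa [PySem.Set.mem_ofList] using this
  · have : x ∈ bs := by simpa using h
    simpa [PySem.Set.mem_ofList] using this

-- ===== VERDICT (by name: the statement is the Claim_ definition above) =====
theorem remover_bloqueios_spec : Claim_equal_remover_bloqueios := by
  intro graph bs _ hpre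
  unfold Spec_remover_bloqueios remover_bloqueios remover_bloqueios_alt
  rw [pvFold_eq_map bs graph hpre.1 hpre.2]
  simp only [pvSetContains]
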